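-- pv_equiv track=rewrite | github.com/pypi-data/pypi-mirror-167 | packages/qArchSearch/qArchSearch-1.0.2.tar.gz/qArchSearch-1.0.2/qArchSearch/search.py | dependency_extracting
-- ===== SOURCE A (Python) =====
-- def dependency_extracting(list_gate_qubits, count_program_qubit: int):
--     """Extract dependency relations between the gates.
--     If two gates g_1 and g_2 both acts on a qubit *and there is no gate
--     between g_1 and g_2 that act on this qubit*, we then say that
--     g2 depends on g1, which means that (1,2) will be in dependency list.
--
--     Args:
--         list_gate_qubits: a list of gates in OLSQ IR
--         count_program_qubit: the number of logical/program qubit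
--
--     Returns:
--         list_dependency: a list of dependency between the gates
--     """
--
--     list_dependency = []
--     list_last_gate = [-1 for i in range(count_program_qubit)]
--     # list_last_gate records the latest gate that acts on each qubit.
--     # When we sweep through all the gates, this list is updated and the
--     # dependencies induced by the update is noted.
--     for i, qubits in enumerate(list_gate_qubits):
--
--         if list_last_gate[qubits[0]] >= 0:
--             list_dependency.append((list_last_gate[qubits[0]], i))
--         list_last_gate[qubits[0]] = i
--
--         if len(qubits) == 2:
--             if list_last_gate[qubits[1]] >= 0:
--                 list_dependency.append((list_last_gate[qubits[1]], i))
--             list_last_gate[qubits[1]] = i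
--
--     return tuple(list_dependency)
-- ===== SOURCE B (Python) =====
-- def dependency_extracting(list_gate_qubits, count_program_qubit: int):
--     """Re-implementation via a per-qubit occurrence index: group gate occurrences
--     by qubit slot, pair consecutive occurrences, then sort back into processing
--     order (gate index, then position; position is 0 or 1, so 2*gate+pos is that order)."""
--     occurrences = [[] for _ in range(count_program_qubit)]
--     for i, qubits in enumerate(list_gate_qubits):
--         occurrences[qubits[0]].append((i, 0))
--         if len(qubits) == 2:
--             occurrences[qubits[1]].append((i, 1))
--     tagged = []
--     for occ in occurrences:
--         for prev_e, cur_e in zip(occ, occ[1:]):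
--             tagged.append((cur_e[0], cur_e[1], prev_e[0]))
--     tagged.sort(key=lambda t: 2 * t[0] + t[1])
--     return tuple((prev, cur) for cur, pos, prev in tagged)
-- ===== Notes on version B (the rewrite author's own statement) =====
-- stated objective: alternative
-- what changed: Replaces A's single stateful sweep maintaining a last-gate-per-qubit array with a two-pass occurrence index: first group gate occurrences per qubit slot, then pair consecutive occurrences in each slot and sort the pairs back into processing order.
import Mathlib
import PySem

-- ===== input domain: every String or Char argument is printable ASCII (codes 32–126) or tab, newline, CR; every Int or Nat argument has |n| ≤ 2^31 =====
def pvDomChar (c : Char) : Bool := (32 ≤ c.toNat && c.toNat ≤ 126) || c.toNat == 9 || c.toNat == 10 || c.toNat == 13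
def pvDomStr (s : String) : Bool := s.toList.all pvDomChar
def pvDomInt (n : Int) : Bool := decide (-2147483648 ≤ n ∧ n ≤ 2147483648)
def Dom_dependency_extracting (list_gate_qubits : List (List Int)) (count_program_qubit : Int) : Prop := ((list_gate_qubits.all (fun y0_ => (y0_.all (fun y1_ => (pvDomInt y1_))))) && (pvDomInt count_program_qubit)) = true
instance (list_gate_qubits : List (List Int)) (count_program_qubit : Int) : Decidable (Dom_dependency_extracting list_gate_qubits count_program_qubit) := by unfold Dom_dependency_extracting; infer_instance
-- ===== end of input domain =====

-- B replaces A's stateful last-gate-per-qubit sweep by a per-qubit occurrence index whose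
-- consecutive pairs are sorted back into processing order (alternative decomposition, not faster).

-- ===== PORT A =====
-- loop body of A's single sweep: state = (list_dependency, list_last_gate)
def depStepA (st : List (Int × Int) × List Int) (iq : Int × List Int) : List (Int × Int) × List Int :=
  let i := iq.1
  let qubits := iq.2
  let q0 := PySem.List.pyGetD qubits 0 0
  let d1 := if PySem.List.pyGetD st.2 q0 (-1) ≥ 0 then st.1 ++ [(PySem.List.pyGetD st.2 q0 (-1), i)] else st.1
  let l1 := PySem.List.pySetD st.2 q0 i
  if qubits.length = 2 then
    let q1 := PySem.List.pyGetD qubits 1 0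
    let d2 := if PySem.List.pyGetD l1 q1 (-1) ≥ 0 then d1 ++ [(PySem.List.pyGetD l1 q1 (-1), i)] else d1
    (d2, PySem.List.pySetD l1 q1 i)
  else (d1, l1)

def dependency_extracting (list_gate_qubits : List (List Int)) (count_program_qubit : Int) : List (Int × Int) :=
  (((PySem.List.enumerate list_gate_qubits 0).foldl depStepA
      ([], (PySem.List.pyRange 0 count_program_qubit 1).map (fun _ => (-1 : Int))))).1

-- ===== PORT B =====
-- first pass: `occurrences[qubits[0]].append((i, 0))` (and position 1 for 2-qubit gates)
def occStepB (occ : List (List (Int × Int))) (iq : Int × List Int) : List (List (Int × Int)) :=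
  let q0 := PySem.List.pyGetD iq.2 0 0
  let occ1 := PySem.List.pySetD occ q0 (PySem.List.pyGetD occ q0 [] ++ [(iq.1, 0)])
  if iq.2.length = 2 then
    let q1 := PySem.List.pyGetD iq.2 1 0
    PySem.List.pySetD occ1 q1 (PySem.List.pyGetD occ1 q1 [] ++ [(iq.1, 1)])
  else occ1

-- second pass: `for prev_e, cur_e in zip(occ, occ[1:]): tagged.append((cur_e[0], cur_e[1], prev_e[0]))`
def taggedOfB (occ : List (List (Int × Int))) : List (Int × Int × Int) :=
  occ.foldl (fun t o =>
    t ++ ((o.zip (PySem.List.slice o (some 1) none)).map (fun pr => (pr.2.1, pr.2.2, pr.1.1)))) []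

-- sort key `2 * t[0] + t[1]` (gate index, then position; position is 0 or 1)
def depKeyB (t : Int × Int × Int) : Int := 2 * t.1 + t.2.1

def dependency_extracting_alt (list_gate_qubits : List (List Int)) (count_program_qubit : Int) : List (Int × Int) :=
  let occ := (PySem.List.enumerate list_gate_qubits 0).foldl occStepB
      ((PySem.List.pyRange 0 count_program_qubit 1).map (fun _ => ([] : List (Int × Int))))
  (PySem.List.sorted (taggedOfB occ) depKeyB).map (fun t => (t.2.2, t.1))

-- ===== PRECONDITION & SPEC =====
-- Pre_ is exactly the inputs on which A returns: every gate is nonempty, its first qubit is a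
-- valid (possibly negative, Python-style) index into the per-qubit array of length
-- count_program_qubit.toNat, and so is its second qubit when the gate has exactly two.
def Pre_dependency_extracting (list_gate_qubits : List (List Int)) (count_program_qubit : Int) : Prop :=
  ∀ g ∈ list_gate_qubits, g ≠ [] ∧
    PySem.Raise.InRange count_program_qubit.toNat (g.getD 0 0) ∧
    (g.length = 2 → PySem.Raise.InRange count_program_qubit.toNat (g.getD 1 0))

instance (list_gate_qubits : List (List Int)) (count_program_qubit : Int) : Decidable (Pre_dependency_extracting list_gate_qubits count_program_qubit) := by
  unfold Pre_dependency_extracting; infer_instance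

def pvWitness_dependency_extracting : List (List Int) × Int := ([[0, 1], [1], [1, 2], [0]], 3)

def Spec_dependency_extracting (list_gate_qubits : List (List Int)) (count_program_qubit : Int) (out : List (Int × Int)) : Prop := out = dependency_extracting_alt list_gate_qubits count_program_qubit
instance (list_gate_qubits : List (List Int)) (count_program_qubit : Int) (out : List (Int × Int)) : Decidable (Spec_dependency_extracting list_gate_qubits count_program_qubit out) := by unfold Spec_dependency_extracting; infer_instance

-- ===== CLAIM (what is proved, stated in full; the proofs are below) =====
def Claim_equal_dependency_extracting : Prop := ∀ (list_gate_qubits : List (List Int)) (count_program_qubit : Int), Dom_dependency_extracting list_gate_qubits count_program_qubit → Pre_dependency_extracting list_gate_qubits count_program_qubit → Spec_dependency_extracting list_gate_qubits count_program_qubit (dependency_extracting list_gate_qubits count_program_qubit)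

-- ===== LEMMAS AND PROOFS =====

-- the gate recorded by the latest occurrence in a slot (A keeps this number in its array)
def lastOf (l : List (Int × Int)) : Int :=
  match l.getLast? with
  | some e => e.1
  | none => -1

-- consecutive-occurrence pairs of one slot, tagged (current gate, position, previous gate)
def pairsOf (o : List (Int × Int)) : List (Int × Int × Int) :=
  (o.zip o.tail).map (fun pr => (pr.2.1, pr.2.2, pr.1.1))

lemma taggedOfB_eq_flatMap (occ : List (List (Int × Int))) :
    taggedOfB occ = occ.flatMap pairsOf := by
  unfold taggedOfB pairsOf
  rw [PySem.List.foldl_append_eq_flatMap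
    (fun o => ((o.zip (PySem.List.slice o (some 1) none)).map (fun pr => (pr.2.1, pr.2.2, pr.1.1)))) occ []]
  simp [PySem.List.slice_from_one]

lemma pairsOf_cons_cons (x y : Int × Int) (r : List (Int × Int)) :
    pairsOf (x :: y :: r) = (y.1, y.2, x.1) :: pairsOf (y :: r) := rfl

lemma pairsOf_append (o : List (Int × Int)) (e : Int × Int) :
    pairsOf (o ++ [e]) = pairsOf o ++
      (match o.getLast? with
       | some p => [(e.1, e.2, p.1)]
       | none => []) := by
  induction o with
  | nil => rfl
  | cons x o ih =>
      cases o with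
      | nil => rfl
      | cons y r =>
          have h1 : (x :: y :: r) ++ [e] = x :: ((y :: r) ++ [e]) := rfl
          rw [h1]
          have h2 : (y :: r) ++ [e] = y :: (r ++ [e]) := rfl
          rw [h2, pairsOf_cons_cons, ← h2, ih, pairsOf_cons_cons]
          simp [List.getLast?_cons_cons]

lemma lastOf_append_singleton (o : List (Int × Int)) (e : Int × Int) :
    lastOf (o ++ [e]) = e.1 := by
  simp [lastOf]

lemma pyIdx?_some (n : Nat) (q : Int) (h : PySem.Raise.InRange n q) :
    ∃ m, PySem.List.pyIdx? n q = some m ∧ m < n := by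
  obtain ⟨h1, h2⟩ := h
  unfold PySem.List.pyIdx?
  by_cases h0 : 0 ≤ q
  · rw [if_pos h0, if_pos h2]
    exact ⟨q.toNat, rfl, by omega⟩
  · rw [if_neg h0, if_pos h1]
    exact ⟨n - (-q).toNat, rfl, by omega⟩

lemma pyGetD_idx {α : Type} (xs : List α) (q : Int) (d : α) (m : Nat)
    (h : PySem.List.pyIdx? xs.length q = some m) :
    PySem.List.pyGetD xs q d = xs.getD m d := by
  simp [PySem.List.pyGetD, PySem.List.pyGet?, h, List.getD_eq_getElem?_getD]

lemma pySetD_idx {α : Type} (xs : List α) (q : Int) (v : α) (m : Nat)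
    (h : PySem.List.pyIdx? xs.length q = some m) :
    PySem.List.pySetD xs q v = xs.set m v := by
  simp [PySem.List.pySetD, PySem.List.pySet?, h]

lemma getD_set {α : Type} (l : List α) (m s : Nat) (v d : α) (hm : m < l.length) :
    (l.set m v).getD s d = if s = m then v else l.getD s d := by
  by_cases h : s = m
  · subst h
    simp [List.getD_eq_getElem?_getD, hm]
  · have h' : m ≠ s := fun hh => h hh.symm
    simp [List.getD_eq_getElem?_getD, h, h']

lemma getD_map_const {α β : Type} (l : List α) (c : β) (s : Nat) :
    (l.map (fun _ => c)).getD s c = c := by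
  by_cases h : s < l.length
  · simp [List.getD_eq_getElem?_getD, h]
  · rw [List.getD_eq_getElem?_getD, List.getElem?_eq_none (by simpa using h)]
    rfl

lemma perm_insert_block {α : Type} (X P N Y : List α) :
    (X ++ ((P ++ N) ++ Y)).Perm ((X ++ (P ++ Y)) ++ N) := by
  have h1 : X ++ ((P ++ N) ++ Y) = (X ++ P) ++ (N ++ Y) := by simp
  have h2 : (X ++ (P ++ Y)) ++ N = (X ++ P) ++ (Y ++ N) := by simp
  rw [h1, h2]
  exact (List.perm_append_comm).append_left (X ++ P)

-- one Python statement pair `if last[q] >= 0: deps.append(...)` / `last[q] = i` against the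
-- occurrence structure: reading gives lastOf of the slot, writing appends the occurrence
lemma touch (cnt : Int) (lastL : List Int) (occ : List (List (Int × Int))) (q i pos : Int)
    (hl1 : lastL.length = cnt.toNat) (hl2 : occ.length = cnt.toNat)
    (hR : ∀ s : Nat, lastL.getD s (-1) = lastOf (occ.getD s []))
    (hN : ∀ s : Nat, ∀ e ∈ occ.getD s [], 0 ≤ e.1)
    (hq : PySem.Raise.InRange cnt.toNat q) (hi : 0 ≤ i) :
    PySem.List.pyGetD lastL q (-1) = lastOf (PySem.List.pyGetD occ q []) ∧
    (PySem.List.pySetD lastL q i).length = cnt.toNat ∧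
    (PySem.List.pySetD occ q (PySem.List.pyGetD occ q [] ++ [(i, pos)])).length = cnt.toNat ∧
    (∀ s : Nat, (PySem.List.pySetD lastL q i).getD s (-1)
        = lastOf ((PySem.List.pySetD occ q (PySem.List.pyGetD occ q [] ++ [(i, pos)])).getD s [])) ∧
    (∀ s : Nat, ∀ e ∈ (PySem.List.pySetD occ q (PySem.List.pyGetD occ q [] ++ [(i, pos)])).getD s [], 0 ≤ e.1) ∧
    ((PySem.List.pySetD occ q (PySem.List.pyGetD occ q [] ++ [(i, pos)])).flatMap pairsOf).Perm
      ((occ.flatMap pairsOf) ++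
        (if PySem.List.pyGetD lastL q (-1) ≥ 0
          then [(i, pos, PySem.List.pyGetD lastL q (-1))] else [])) := by
  obtain ⟨m, hm, hmlt⟩ := pyIdx?_some cnt.toNat q hq
  have hm1 : PySem.List.pyIdx? lastL.length q = some m := by rw [hl1]; exact hm
  have hm2 : PySem.List.pyIdx? occ.length q = some m := by rw [hl2]; exact hm
  have hmlt1 : m < lastL.length := by omega
  have hmlt2 : m < occ.length := by omega
  have hget1 : PySem.List.pyGetD lastL q (-1) = lastL.getD m (-1) := pyGetD_idx lastL q (-1) m hm1
  have hget2 : PySem.List.pyGetD occ q [] = occ.getD m [] := pyGetD_idx occ q [] m hm2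
  have hset1 : PySem.List.pySetD lastL q i = lastL.set m i := pySetD_idx lastL q i m hm1
  have hset2 : PySem.List.pySetD occ q (PySem.List.pyGetD occ q [] ++ [(i, pos)])
      = occ.set m (occ.getD m [] ++ [(i, pos)]) := by
    rw [hget2]; exact pySetD_idx occ q _ m hm2
  have hgd : occ.getD m [] = occ[m] := by
    simp [List.getD_eq_getElem?_getD, List.getElem?_eq_getElem hmlt2]
  have hread : PySem.List.pyGetD lastL q (-1) = lastOf (PySem.List.pyGetD occ q []) := by
    rw [hget1, hget2]; exact hR m
  refine ⟨hread, by rw [hset1]; simp [hl1], by rw [hset2]; simp [hl2], ?_, ?_, ?_⟩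
  · intro s
    rw [hset1, hset2, getD_set lastL m s i (-1) hmlt1,
        getD_set occ m s (occ.getD m [] ++ [(i, pos)]) [] hmlt2]
    by_cases h : s = m
    · rw [if_pos h, if_pos h, lastOf_append_singleton]
    · rw [if_neg h, if_neg h]
      exact hR s
  · intro s e he
    rw [hset2, getD_set occ m s (occ.getD m [] ++ [(i, pos)]) [] hmlt2] at he
    by_cases h : s = m
    · rw [if_pos h] at he
      rcases List.mem_append.mp he with h1 | h2
      · exact hN m e h1
      · simp at h2
        subst h2
        simpa using hi
    · rw [if_neg h] at he
      exact hN s e he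
  · rw [hset2, hgd]
    have hdecomp : occ = occ.take m ++ occ[m] :: occ.drop (m + 1) := by
      conv_lhs => rw [← List.take_append_drop m occ]
      rw [List.drop_eq_getElem_cons hmlt2]
    have hsetd : occ.set m (occ[m] ++ [(i, pos)])
        = occ.take m ++ (occ[m] ++ [(i, pos)]) :: occ.drop (m + 1) :=
      List.set_eq_take_cons_drop _ hmlt2
    rw [hsetd]
    conv_rhs => rw [hdecomp]
    simp only [List.flatMap_append, List.flatMap_cons]
    rw [pairsOf_append]
    have hcond : (if PySem.List.pyGetD lastL q (-1) ≥ 0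
          then [(i, pos, PySem.List.pyGetD lastL q (-1))] else [])
        = (match occ[m].getLast? with
           | some p => [(i, pos, p.1)]
           | none => ([] : List (Int × Int × Int))) := by
      rw [hread, hget2, hgd]
      cases hlast : occ[m].getLast? with
      | none => simp [lastOf, hlast]
      | some p =>
          have hp : p ∈ occ[m] := List.mem_of_getLast? hlast
          have : 0 ≤ p.1 := by
            have := hN m p (by rw [hgd]; exact hp)
            exact this
          simp [lastOf, hlast, ge_iff_le, this]
    rw [hcond]
    exact perm_insert_block _ _ _ _

lemma mem_opt {c : Prop} [Decidable c] (x t : Int × Int × Int) :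
    t ∈ (if c then [x] else []) → t = x := by
  intro h
  split at h
  · simpa using h
  · simp at h

-- the main induction: A's sweep state against B's occurrence structure, with a ghost list T
-- of tagged dependency triples kept in A's emission order
lemma main_loop (cnt : Int) :
    ∀ (rest L : List (List Int)), Pre_dependency_extracting L cnt →
    ∀ (k : Nat) (deps : List (Int × Int)) (lastL : List Int)
      (occ : List (List (Int × Int))) (T : List (Int × Int × Int)),
      L.drop k = rest →
      lastL.length = cnt.toNat →
      occ.length = cnt.toNat →
      (∀ s : Nat, lastL.getD s (-1) = lastOf (occ.getD s [])) →
      (∀ s : Nat, ∀ e ∈ occ.getD s [], 0 ≤ e.1) →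
      deps = T.map (fun t => (t.2.2, t.1)) →
      T.Perm (occ.flatMap pairsOf) →
      T.Pairwise (fun a b => depKeyB a < depKeyB b) →
      (∀ t ∈ T, depKeyB t < 2 * k) →
      ∃ T' : List (Int × Int × Int),
        ((PySem.List.enumerate rest (k : Int)).foldl depStepA (deps, lastL)).1
          = T'.map (fun t => (t.2.2, t.1)) ∧
        T'.Perm (((PySem.List.enumerate rest (k : Int)).foldl occStepB occ).flatMap pairsOf) ∧
        T'.Pairwise (fun a b => depKeyB a < depKeyB b) := by
  intro rest
  induction rest with
  | nil =>
      intro L hPre k deps lastL occ T hdrop hl1 hl2 hR hN hdeps hPerm hPair hBound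
      refine ⟨T, ?_, ?_, hPair⟩
      · simpa [PySem.List.enumerate] using hdeps
      · simpa [PySem.List.enumerate] using hPerm
  | cons g rest' ih =>
      intro L hPre k deps lastL occ T hdrop hl1 hl2 hR hN hdeps hPerm hPair hBound
      have hgk : L[k]? = some g := by
        have h : (L.drop k).head? = L[k]? := List.head?_drop
        rw [hdrop] at h; simpa using h.symm
      have hdrop' : L.drop (k + 1) = rest' := by
        have h : (L.drop k).drop 1 = L.drop (k + 1) := List.drop_drop
        rw [hdrop] at h; simpa using h.symm
      have hmem : g ∈ L := List.mem_of_getElem? hgk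
      obtain ⟨hgne, hq0r, hq1r⟩ := hPre g hmem
      have hk0 : (0 : Int) ≤ (k : Int) := Int.natCast_nonneg k
      have hcast : ((k : Int) + 1) = (((k + 1 : Nat) : Int)) := by push_cast; ring
      have hq0eq : PySem.List.pyGetD g 0 0 = g.getD 0 0 := by
        cases g with
        | nil => rfl
        | cons x t =>
            simp [PySem.List.pyGetD, List.getD_eq_getElem?_getD]
      have hq0' : PySem.Raise.InRange cnt.toNat (PySem.List.pyGetD g 0 0) := by
        rw [hq0eq]; exact hq0r
      obtain ⟨hread1, hl1', hl2', hR1, hN1, hPerm1⟩ :=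
        touch cnt lastL occ (PySem.List.pyGetD g 0 0) (k : Int) 0 hl1 hl2 hR hN hq0' hk0
      rw [PySem.List.enumerate_cons]
      simp only [List.foldl_cons]
      by_cases hlen2 : g.length = 2
      · -- 2-qubit gate
        obtain ⟨a, b, rfl⟩ : ∃ a b, g = [a, b] := by
          match g, hlen2 with
          | [a, b], _ => exact ⟨a, b, rfl⟩
        have hg0 : PySem.List.pyGetD [a, b] 0 0 = a := by
          simp [PySem.List.pyGetD, PySem.List.pyGet?, PySem.List.pyIdx?]
        have hg1 : PySem.List.pyGetD [a, b] 1 0 = b := by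
          simp [PySem.List.pyGetD, PySem.List.pyGet?, PySem.List.pyIdx?]
        rw [hg0] at hread1 hl1' hl2' hR1 hN1 hPerm1
        have hq1' : PySem.Raise.InRange cnt.toNat b := by
          have := hq1r hlen2
          simpa [List.getD_eq_getElem?_getD] using this
        obtain ⟨hread2, hl1'', hl2'', hR2, hN2, hPerm2⟩ :=
          touch cnt (PySem.List.pySetD lastL a (k : Int))
            (PySem.List.pySetD occ a (PySem.List.pyGetD occ a [] ++ [((k : Int), 0)]))
            b (k : Int) 1 hl1' hl2' hR1 hN1 hq1' hk0
        have hstep : depStepA (deps, lastL) ((k : Int), [a, b]) =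
            ((if PySem.List.pyGetD (PySem.List.pySetD lastL a (k : Int)) b (-1) ≥ 0
                then (if PySem.List.pyGetD lastL a (-1) ≥ 0
                        then deps ++ [(PySem.List.pyGetD lastL a (-1), (k : Int))] else deps)
                      ++ [(PySem.List.pyGetD (PySem.List.pySetD lastL a (k : Int)) b (-1), (k : Int))]
                else (if PySem.List.pyGetD lastL a (-1) ≥ 0
                        then deps ++ [(PySem.List.pyGetD lastL a (-1), (k : Int))] else deps)),
              PySem.List.pySetD (PySem.List.pySetD lastL a (k : Int)) b (k : Int)) := by
          simp only [depStepA, hg0, hg1]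
          simp
        have hstepB : occStepB occ ((k : Int), [a, b]) =
            PySem.List.pySetD (PySem.List.pySetD occ a (PySem.List.pyGetD occ a [] ++ [((k : Int), 0)]))
              b (PySem.List.pyGetD (PySem.List.pySetD occ a (PySem.List.pyGetD occ a [] ++ [((k : Int), 0)])) b [] ++ [((k : Int), 1)]) := by
          simp only [occStepB, hg0, hg1]
          simp
        rw [hstep, hstepB, hcast]
        set v0 := PySem.List.pyGetD lastL a (-1) with hv0
        set v1 := PySem.List.pyGetD (PySem.List.pySetD lastL a (k : Int)) b (-1) with hv1
        refine ih L hPre (k + 1) _ _ _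
          ((T ++ (if v0 ≥ 0 then [((k : Int), 0, v0)] else []))
            ++ (if v1 ≥ 0 then [((k : Int), 1, v1)] else []))
          hdrop' hl1'' hl2'' hR2 hN2 ?_ ?_ ?_ ?_
        · by_cases hc0 : v0 ≥ 0 <;> by_cases hc1 : v1 ≥ 0 <;>
            simp [hc0, hc1, hdeps]
        · exact (((hPerm.append (List.Perm.refl _)).trans hPerm1.symm).append
            (List.Perm.refl _)).trans hPerm2.symm
        · refine List.pairwise_append.mpr ⟨List.pairwise_append.mpr ⟨hPair, ?_, ?_⟩, ?_, ?_⟩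
          · split <;> simp
          · intro t ht u hu
            have hu' := mem_opt _ u hu
            have := hBound t ht
            subst hu'
            simp only [depKeyB] at *
            omega
          · split <;> simp
          · intro t ht u hu
            have hu' := mem_opt _ u hu
            subst hu'
            rcases List.mem_append.mp ht with h1 | h2
            · have := hBound t h1
              simp only [depKeyB] at *
              omega
            · have := mem_opt _ t h2
              subst this
              simp only [depKeyB]
              omega
        · intro t ht
          rcases List.mem_append.mp ht with h1 | h2
          · rcases List.mem_append.mp h1 with h3 | h4
            · have := hBound t h3
              push_cast
              omega
            · have := mem_opt _ t h4
              subst this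
              simp only [depKeyB]
              push_cast
              omega
          · have := mem_opt _ t h2
            subst this
            simp only [depKeyB]
            push_cast
            omega
      · -- 1-qubit (or longer, only position 0 used) gate
        have hstep : depStepA (deps, lastL) ((k : Int), g) =
            ((if PySem.List.pyGetD lastL (PySem.List.pyGetD g 0 0) (-1) ≥ 0
                then deps ++ [(PySem.List.pyGetD lastL (PySem.List.pyGetD g 0 0) (-1), (k : Int))] else deps),
              PySem.List.pySetD lastL (PySem.List.pyGetD g 0 0) (k : Int)) := by
          simp only [depStepA]
          rw [if_neg hlen2]
        have hstepB : occStepB occ ((k : Int), g) =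
            PySem.List.pySetD occ (PySem.List.pyGetD g 0 0)
              (PySem.List.pyGetD occ (PySem.List.pyGetD g 0 0) [] ++ [((k : Int), 0)]) := by
          simp only [occStepB]
          rw [if_neg hlen2]
        rw [hstep, hstepB, hcast]
        set v0 := PySem.List.pyGetD lastL (PySem.List.pyGetD g 0 0) (-1) with hv0
        refine ih L hPre (k + 1) _ _ _
          (T ++ (if v0 ≥ 0 then [((k : Int), 0, v0)] else []))
          hdrop' hl1' hl2' hR1 hN1 ?_ ?_ ?_ ?_
        · by_cases hc0 : v0 ≥ 0 <;> simp [hc0, hdeps]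
        · exact (hPerm.append (List.Perm.refl _)).trans hPerm1.symm
        · refine List.pairwise_append.mpr ⟨hPair, ?_, ?_⟩
          · split <;> simp
          · intro t ht u hu
            have hu' := mem_opt _ u hu
            have := hBound t ht
            subst hu'
            simp only [depKeyB] at *
            omega
        · intro t ht
          rcases List.mem_append.mp ht with h1 | h2
          · have := hBound t h1
            push_cast
            omega
          · have := mem_opt _ t h2
            subst this
            simp only [depKeyB]
            push_cast
            omega

-- ===== VERDICT (by name: the statement is the Claim_ definition above) =====
theorem dependency_extracting_spec : Claim_equal_dependency_extracting := by
  intro L cnt _ hPre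
  unfold Spec_dependency_extracting
  obtain ⟨T', hA, hPerm, hPair⟩ := main_loop cnt L L hPre 0 []
    ((PySem.List.pyRange 0 cnt 1).map (fun _ => (-1 : Int)))
    ((PySem.List.pyRange 0 cnt 1).map (fun _ => ([] : List (Int × Int)))) []
    rfl (by simp) (by simp)
    (by intro s; rw [getD_map_const, getD_map_const]; rfl)
    (by intro s e he; rw [getD_map_const] at he; simp at he)
    rfl
    (by
      have h : ((PySem.List.pyRange 0 cnt 1).map (fun _ => ([] : List (Int × Int)))).flatMap pairsOf = [] := by
        simp [pairsOf]
      rw [h])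
    (by simp)
    (by simp)
  have hz : ((0 : Nat) : Int) = (0 : Int) := rfl
  rw [hz] at hA hPerm
  rw [show dependency_extracting L cnt
        = ((PySem.List.enumerate L 0).foldl depStepA
            ([], (PySem.List.pyRange 0 cnt 1).map (fun _ => (-1 : Int)))).1 from rfl,
      show dependency_extracting_alt L cnt
        = (PySem.List.sorted (taggedOfB ((PySem.List.enumerate L 0).foldl occStepB
            ((PySem.List.pyRange 0 cnt 1).map (fun _ => ([] : List (Int × Int)))))) depKeyB).map
            (fun t => (t.2.2, t.1)) from rfl,
      taggedOfB_eq_flatMap,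
      PySem.List.sorted_eq_of_perm_of_pairwise_lt _ T' depKeyB hPerm hPair, hA]
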